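-- pv_equiv track=rewrite | github.com/GVCUTV/BK_ASF | etl/9_enrich_feedback_cols.py | _has_fail_then_success
-- ===== SOURCE A (Python) =====
-- FAIL_TOKENS    = {"fail", "failure", "failed", "error", "timed_out", "timeout", "cancelled", "canceled", "aborted", "broken"}
--
-- SUCCESS_TOKENS = {"success", "succeeded", "passed", "ok", "green", "completed_success"}
--
-- def _has_fail_then_success(tokens):
--     """True if we see any failure-like token and later a success-like token."""
--     toks = [t.lower() for t in tokens]
--     seen_fail = False
--     for t in toks:
--         if any(k in t for k in FAIL_TOKENS):
--             seen_fail = True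
--         if seen_fail and any(k in t for k in SUCCESS_TOKENS):
--             return True
--     return False
-- ===== SOURCE B (Python) =====
-- FAIL_TOKENS    = {"fail", "failure", "failed", "error", "timed_out", "timeout", "cancelled", "canceled", "aborted", "broken"}
--
-- SUCCESS_TOKENS = {"success", "succeeded", "passed", "ok", "green", "completed_success"}
--
-- def _has_fail_then_success(tokens):
--     """True if some position j holds a success-like token and some position i <= j
--     holds a failure-like token (brute-force check of all (prefix, position) pairs)."""
--     toks = [t.lower() for t in tokens]
--     return any(
--         any(k in t for k in SUCCESS_TOKENS)
--         and any(any(k in u for k in FAIL_TOKENS) for u in toks[:j + 1])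
--         for j, t in enumerate(toks)
--     )
-- ===== Notes on version B (the rewrite author's own statement) =====
-- stated objective: alternative
-- what changed: Replaced A's single stateful loop with a seen_fail flag by a stateless brute-force quantifier: for every position j, test whether the token at j is success-like and the inclusive prefix toks[:j+1] contains a failure-like token.
import Mathlib
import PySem

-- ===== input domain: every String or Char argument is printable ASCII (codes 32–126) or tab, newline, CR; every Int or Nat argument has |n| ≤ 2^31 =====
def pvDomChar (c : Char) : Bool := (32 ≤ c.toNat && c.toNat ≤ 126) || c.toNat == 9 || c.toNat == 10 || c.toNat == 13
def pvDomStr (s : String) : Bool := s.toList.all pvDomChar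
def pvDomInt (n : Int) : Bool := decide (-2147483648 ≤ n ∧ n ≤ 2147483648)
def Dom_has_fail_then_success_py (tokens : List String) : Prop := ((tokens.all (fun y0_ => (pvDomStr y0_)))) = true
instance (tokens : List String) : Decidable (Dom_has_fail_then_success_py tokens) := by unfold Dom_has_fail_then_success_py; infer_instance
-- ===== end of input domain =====

-- B replaces A's single stateful seen_fail loop by a stateless brute-force quantifier over
-- positions j: success-like token at j and a failure-like token in the inclusive prefix
-- toks[:j+1]; a different (quadratic, flag-free) decomposition of the same predicate.

-- ===== PORT A =====
def pvFailTokens : List String :=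
  ["fail", "failure", "failed", "error", "timed_out", "timeout", "cancelled", "canceled", "aborted", "broken"]
def pvSuccessTokens : List String :=
  ["success", "succeeded", "passed", "ok", "green", "completed_success"]

-- the for-loop of A: state is seen_fail; early return True
def pvLoopA : List String → Bool → Bool
  | [], _ => false
  | t :: rest, seen_fail =>
      let seen_fail' := if pvFailTokens.any (fun k => PySem.Str.isIn k t) then true else seen_fail
      if seen_fail' && pvSuccessTokens.any (fun k => PySem.Str.isIn k t) then true
      else pvLoopA rest seen_fail'

def has_fail_then_success_py (tokens : List String) : Bool :=
  let toks := tokens.map PySem.Str.lower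
  pvLoopA toks false

-- ===== PORT B =====
-- any(k in t for k in SUCCESS_TOKENS)
def pvIsSucc (t : String) : Bool := pvSuccessTokens.any (fun k => PySem.Str.isIn k t)
-- any(k in u for k in FAIL_TOKENS)
def pvIsFail (u : String) : Bool := pvFailTokens.any (fun k => PySem.Str.isIn k u)

def has_fail_then_success_py_alt (tokens : List String) : Bool :=
  let toks := tokens.map PySem.Str.lower
  (PySem.List.enumerate toks 0).any (fun p =>
    pvIsSucc p.2 && (PySem.List.slice toks none (some (p.1 + 1))).any pvIsFail)

-- ===== PRECONDITION & SPEC =====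
def Spec_has_fail_then_success_py (tokens : List String) (out : Bool) : Prop := out = has_fail_then_success_py_alt tokens
instance (tokens : List String) (out : Bool) : Decidable (Spec_has_fail_then_success_py tokens out) := by unfold Spec_has_fail_then_success_py; infer_instance

-- ===== CLAIM (what is proved, stated in full; the proofs are below) =====
def Claim_equal_has_fail_then_success_py : Prop := ∀ (tokens : List String), Dom_has_fail_then_success_py tokens → Spec_has_fail_then_success_py tokens (has_fail_then_success_py tokens)

-- ===== LEMMAS AND PROOFS =====

-- B's quantifier over the tail l, with the already-processed prefix pre explicit, equals
-- A's loop started with seen_fail = "pre contains a failure-like token".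
theorem pvB_eq_loopA (l pre : List String) :
    (PySem.List.enumerate l (pre.length : Int)).any (fun p =>
        pvIsSucc p.2 && (PySem.List.slice (pre ++ l) none (some (p.1 + 1))).any pvIsFail)
      = pvLoopA l (pre.any pvIsFail) := by
  induction l generalizing pre with
  | nil => simp [PySem.List.enumerate, pvLoopA]
  | cons t rest ih =>
      rw [PySem.List.enumerate_cons, List.any_cons]
      have hsl : PySem.List.slice (pre ++ t :: rest) none (some ((pre.length : Int) + 1))
          = pre ++ [t] := by
        rw [show ((pre.length : Int) + 1) = ((pre.length + 1 : Nat) : Int) by push_cast; ring,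
          PySem.List.slice_to_natCast]
        rw [show pre ++ t :: rest = (pre ++ [t]) ++ rest by simp,
          show pre.length + 1 = (pre ++ [t]).length by simp]
        exact List.take_left ..
      have htail := ih (pre ++ [t])
      rw [show pre ++ t :: rest = (pre ++ [t]) ++ rest by simp,
        show (pre.length : Int) + 1 = ((pre ++ [t]).length : Int) by simp] at *
      rw [hsl, htail]
      have e1 : (pvFailTokens.any fun k => PySem.Str.isIn k t) = pvIsFail t := rfl
      have e2 : (pvSuccessTokens.any fun k => PySem.Str.isIn k t) = pvIsSucc t := rfl
      simp only [pvLoopA, e1, e2, List.any_append, List.any_cons, List.any_nil, Bool.or_false]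
      cases hf : pvIsFail t <;> cases hp : pre.any pvIsFail <;>
        cases hs : pvIsSucc t <;> simp_all

-- ===== VERDICT (by name: the statement is the Claim_ definition above) =====
theorem has_fail_then_success_py_spec : Claim_equal_has_fail_then_success_py := by
  intro tokens _
  unfold Spec_has_fail_then_success_py has_fail_then_success_py has_fail_then_success_py_alt
  have := pvB_eq_loopA (tokens.map PySem.Str.lower) []
  simpa using this.symm
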